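-- pv_equiv track=rewrite | github.com/armantajback/course-rankings | complete_workflow.py | get_course_bucket
-- ===== SOURCE A (Python) =====
-- def get_course_bucket(course_title):
--     """Determine which bucket a course belongs to"""
--     flmbe_categories = {
--         'Society': [
--             'Social Entrepreneurship and Innovation',
--             'Culture (And Why It Matters)',
--             'The Legal Infrastructure of Business',
--             'Business with Purpose',
--             'Business, Politics, and Ethics',
--             'Designing a Good Life',
--             'Perspectives on Capitalism',
--             'The Firm and the Non-Market Environment',
--             'Impact Investing'
--         ],
--         'Economy': [
--             'Macroeconomics and the Business Environment',
--             'Money and Banking',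
--             'Business in Historical Perspective',
--             'International Commercial Policy',
--             'International Financial Policy',
--             'The Wealth of Nations'
--         ],
--         'Strategy': [
--             'Platforms and Market Design',
--             'Competitive Strategy',
--             'Technology Strategy',
--             'Strategy Simulation: Creating Value in Complex and Ambiguous Settings',
--             'Strategy and Structure: Markets and Organizations',
--             'Game Theory'
--         ],
--         'People': [
--             'Leadership Studio',
--             'Managing in Organizations',
--             'Managing the Workplace',
--             'Power and Influence in Organizations',
--             'Diversity in Organizations'
--         ],
--         'Decisions': [
--             'Managerial Decision Modeling',
--             'The Study of Behavioral Economics',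
--             'Internal Information for Strategic Decisions',
--             'Advanced Decision Models with Python',
--             'Managerial Decision Making'
--         ],
--         'Operations': [
--             'Supply Chain Strategy and Practice',
--             'Managing Service Operations',
--             'Operations Management: Business Process Fundamentals',
--             'Revenue Management'
--         ],
--         'Finance': [
--             'Entrepreneurial Finance and Private Equity',
--             'Asset Pricing I',
--             'Investments',
--             'Corporate Finance I',
--             'Corporation Finance',
--             'Cases in Financial Management',
--             'Corporate Finance II',
--             'Asset Pricing II',
--             'Portfolio Management',
--             'Advanced Investments',
--             'Fixed Income Asset Pricing',
--             'Debt, Distress, and Restructuring',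
--             'International Corporate Finance'
--         ],
--         'Marketing': [
--             'Marketing Strategy',
--             'Marketing Strategy (with Sustainability Simulation)',
--             'Digital Marketing',
--             'Data Science for Marketing Decision Making',
--             'Consumer Behavior',
--             'Digital Marketing Lab',
--             'Lab in Developing New Products and Services',
--             'New Products and Services',
--             'Pricing Strategies',
--             'Brand Management in a Digital Age',
--             'Data-Driven Marketing',
--             'Experimental Marketing'
--         ]
--     }
--
--     for bucket, titles in flmbe_categories.items():
--         if course_title in titles:
--             return bucket
--
--     return 'Other'
-- ===== SOURCE B (Python) =====
-- """Re-implementation: one flat literal title->bucket dict; lookup is a single dict.get (no loop, no per-call dict build)."""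
--
-- _TITLE_TO_BUCKET = {
--     'Social Entrepreneurship and Innovation': 'Society',
--     'Culture (And Why It Matters)': 'Society',
--     'The Legal Infrastructure of Business': 'Society',
--     'Business with Purpose': 'Society',
--     'Business, Politics, and Ethics': 'Society',
--     'Designing a Good Life': 'Society',
--     'Perspectives on Capitalism': 'Society',
--     'The Firm and the Non-Market Environment': 'Society',
--     'Impact Investing': 'Society',
--     'Macroeconomics and the Business Environment': 'Economy',
--     'Money and Banking': 'Economy',
--     'Business in Historical Perspective': 'Economy',
--     'International Commercial Policy': 'Economy',
--     'International Financial Policy': 'Economy',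
--     'The Wealth of Nations': 'Economy',
--     'Platforms and Market Design': 'Strategy',
--     'Competitive Strategy': 'Strategy',
--     'Technology Strategy': 'Strategy',
--     'Strategy Simulation: Creating Value in Complex and Ambiguous Settings': 'Strategy',
--     'Strategy and Structure: Markets and Organizations': 'Strategy',
--     'Game Theory': 'Strategy',
--     'Leadership Studio': 'People',
--     'Managing in Organizations': 'People',
--     'Managing the Workplace': 'People',
--     'Power and Influence in Organizations': 'People',
--     'Diversity in Organizations': 'People',
--     'Managerial Decision Modeling': 'Decisions',
--     'The Study of Behavioral Economics': 'Decisions',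
--     'Internal Information for Strategic Decisions': 'Decisions',
--     'Advanced Decision Models with Python': 'Decisions',
--     'Managerial Decision Making': 'Decisions',
--     'Supply Chain Strategy and Practice': 'Operations',
--     'Managing Service Operations': 'Operations',
--     'Operations Management: Business Process Fundamentals': 'Operations',
--     'Revenue Management': 'Operations',
--     'Entrepreneurial Finance and Private Equity': 'Finance',
--     'Asset Pricing I': 'Finance',
--     'Investments': 'Finance',
--     'Corporate Finance I': 'Finance',
--     'Corporation Finance': 'Finance',
--     'Cases in Financial Management': 'Finance',
--     'Corporate Finance II': 'Finance',
--     'Asset Pricing II': 'Finance',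
--     'Portfolio Management': 'Finance',
--     'Advanced Investments': 'Finance',
--     'Fixed Income Asset Pricing': 'Finance',
--     'Debt, Distress, and Restructuring': 'Finance',
--     'International Corporate Finance': 'Finance',
--     'Marketing Strategy': 'Marketing',
--     'Marketing Strategy (with Sustainability Simulation)': 'Marketing',
--     'Digital Marketing': 'Marketing',
--     'Data Science for Marketing Decision Making': 'Marketing',
--     'Consumer Behavior': 'Marketing',
--     'Digital Marketing Lab': 'Marketing',
--     'Lab in Developing New Products and Services': 'Marketing',
--     'New Products and Services': 'Marketing',
--     'Pricing Strategies': 'Marketing',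
--     'Brand Management in a Digital Age': 'Marketing',
--     'Data-Driven Marketing': 'Marketing',
--     'Experimental Marketing': 'Marketing'
-- }
--
--
-- def get_course_bucket(course_title):
--     """Determine which bucket a course belongs to"""
--     return _TITLE_TO_BUCKET.get(course_title, 'Other')
-- ===== Notes on version B (the rewrite author's own statement) =====
-- stated objective: idiomatic
-- what changed: B replaces the per-call loop over a bucket->titles dict with one flat literal title->bucket table built at module load, so the function body is a single dict.get with no loop and no per-call dict construction.
import Mathlib
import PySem

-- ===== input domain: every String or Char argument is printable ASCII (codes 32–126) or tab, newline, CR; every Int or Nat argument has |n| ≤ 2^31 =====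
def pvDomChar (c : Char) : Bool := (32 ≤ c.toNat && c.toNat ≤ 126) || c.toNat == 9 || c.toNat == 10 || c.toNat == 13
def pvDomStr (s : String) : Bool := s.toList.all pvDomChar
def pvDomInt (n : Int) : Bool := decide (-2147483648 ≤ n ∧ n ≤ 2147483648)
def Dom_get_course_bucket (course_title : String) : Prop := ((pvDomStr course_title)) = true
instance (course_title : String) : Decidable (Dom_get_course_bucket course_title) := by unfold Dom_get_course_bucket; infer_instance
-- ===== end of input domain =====

-- ===== PORT A =====
-- B replaces the per-call bucket scan with one flat literal title->bucket table (idiomatic; same results).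

-- A: 'for bucket, titles in flmbe_categories.items(): if course_title in titles: return bucket'
def flmbe_categories : List (String × List String) := [
  ("Society", ["Social Entrepreneurship and Innovation", "Culture (And Why It Matters)", "The Legal Infrastructure of Business", "Business with Purpose", "Business, Politics, and Ethics", "Designing a Good Life", "Perspectives on Capitalism", "The Firm and the Non-Market Environment", "Impact Investing"]),
  ("Economy", ["Macroeconomics and the Business Environment", "Money and Banking", "Business in Historical Perspective", "International Commercial Policy", "International Financial Policy", "The Wealth of Nations"]),
  ("Strategy", ["Platforms and Market Design", "Competitive Strategy", "Technology Strategy", "Strategy Simulation: Creating Value in Complex and Ambiguous Settings", "Strategy and Structure: Markets and Organizations", "Game Theory"]),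
  ("People", ["Leadership Studio", "Managing in Organizations", "Managing the Workplace", "Power and Influence in Organizations", "Diversity in Organizations"]),
  ("Decisions", ["Managerial Decision Modeling", "The Study of Behavioral Economics", "Internal Information for Strategic Decisions", "Advanced Decision Models with Python", "Managerial Decision Making"]),
  ("Operations", ["Supply Chain Strategy and Practice", "Managing Service Operations", "Operations Management: Business Process Fundamentals", "Revenue Management"]),
  ("Finance", ["Entrepreneurial Finance and Private Equity", "Asset Pricing I", "Investments", "Corporate Finance I", "Corporation Finance", "Cases in Financial Management", "Corporate Finance II", "Asset Pricing II", "Portfolio Management", "Advanced Investments", "Fixed Income Asset Pricing", "Debt, Distress, and Restructuring", "International Corporate Finance"]),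
  ("Marketing", ["Marketing Strategy", "Marketing Strategy (with Sustainability Simulation)", "Digital Marketing", "Data Science for Marketing Decision Making", "Consumer Behavior", "Digital Marketing Lab", "Lab in Developing New Products and Services", "New Products and Services", "Pricing Strategies", "Brand Management in a Digital Age", "Data-Driven Marketing", "Experimental Marketing"])
]

def bucketLoop (course_title : String) : List (String × List String) → String
  | [] => "Other"
  | (bucket, titles) :: rest =>
      if titles.contains course_title then bucket else bucketLoop course_title rest

def get_course_bucket (course_title : String) : String :=
  bucketLoop course_title flmbe_categories

-- ===== PORT B =====
-- B: '_TITLE_TO_BUCKET = { <flat literal> }' (a dict literal with distinct keys)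
def titleToBucket : PySem.Dict String String := PySem.Dict.ofList [
  ("Social Entrepreneurship and Innovation", "Society"),
  ("Culture (And Why It Matters)", "Society"),
  ("The Legal Infrastructure of Business", "Society"),
  ("Business with Purpose", "Society"),
  ("Business, Politics, and Ethics", "Society"),
  ("Designing a Good Life", "Society"),
  ("Perspectives on Capitalism", "Society"),
  ("The Firm and the Non-Market Environment", "Society"),
  ("Impact Investing", "Society"),
  ("Macroeconomics and the Business Environment", "Economy"),
  ("Money and Banking", "Economy"),
  ("Business in Historical Perspective", "Economy"),
  ("International Commercial Policy", "Economy"),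
  ("International Financial Policy", "Economy"),
  ("The Wealth of Nations", "Economy"),
  ("Platforms and Market Design", "Strategy"),
  ("Competitive Strategy", "Strategy"),
  ("Technology Strategy", "Strategy"),
  ("Strategy Simulation: Creating Value in Complex and Ambiguous Settings", "Strategy"),
  ("Strategy and Structure: Markets and Organizations", "Strategy"),
  ("Game Theory", "Strategy"),
  ("Leadership Studio", "People"),
  ("Managing in Organizations", "People"),
  ("Managing the Workplace", "People"),
  ("Power and Influence in Organizations", "People"),
  ("Diversity in Organizations", "People"),
  ("Managerial Decision Modeling", "Decisions"),
  ("The Study of Behavioral Economics", "Decisions"),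
  ("Internal Information for Strategic Decisions", "Decisions"),
  ("Advanced Decision Models with Python", "Decisions"),
  ("Managerial Decision Making", "Decisions"),
  ("Supply Chain Strategy and Practice", "Operations"),
  ("Managing Service Operations", "Operations"),
  ("Operations Management: Business Process Fundamentals", "Operations"),
  ("Revenue Management", "Operations"),
  ("Entrepreneurial Finance and Private Equity", "Finance"),
  ("Asset Pricing I", "Finance"),
  ("Investments", "Finance"),
  ("Corporate Finance I", "Finance"),
  ("Corporation Finance", "Finance"),
  ("Cases in Financial Management", "Finance"),
  ("Corporate Finance II", "Finance"),
  ("Asset Pricing II", "Finance"),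
  ("Portfolio Management", "Finance"),
  ("Advanced Investments", "Finance"),
  ("Fixed Income Asset Pricing", "Finance"),
  ("Debt, Distress, and Restructuring", "Finance"),
  ("International Corporate Finance", "Finance"),
  ("Marketing Strategy", "Marketing"),
  ("Marketing Strategy (with Sustainability Simulation)", "Marketing"),
  ("Digital Marketing", "Marketing"),
  ("Data Science for Marketing Decision Making", "Marketing"),
  ("Consumer Behavior", "Marketing"),
  ("Digital Marketing Lab", "Marketing"),
  ("Lab in Developing New Products and Services", "Marketing"),
  ("New Products and Services", "Marketing"),
  ("Pricing Strategies", "Marketing"),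
  ("Brand Management in a Digital Age", "Marketing"),
  ("Data-Driven Marketing", "Marketing"),
  ("Experimental Marketing", "Marketing")]

-- "return _TITLE_TO_BUCKET.get(course_title, 'Other')"
def get_course_bucket_alt (course_title : String) : String :=
  titleToBucket.getD course_title "Other"

-- ===== PRECONDITION & SPEC =====
def Spec_get_course_bucket (course_title : String) (out : String) : Prop := out = get_course_bucket_alt course_title
instance (course_title : String) (out : String) : Decidable (Spec_get_course_bucket course_title out) := by unfold Spec_get_course_bucket; infer_instance

-- ===== CLAIM (what is proved, stated in full; the proofs are below) =====
def Claim_equal_get_course_bucket : Prop := ∀ (course_title : String), Dom_get_course_bucket course_title → Spec_get_course_bucket course_title (get_course_bucket course_title)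

-- ===== LEMMAS AND PROOFS =====

-- The dict-literal keys are distinct, so ofList keeps the pair list as is.
set_option maxRecDepth 100000 in
lemma titleToBucket_eq_mk :
    titleToBucket = PySem.Dict.mk (flmbe_categories.flatMap (fun p => p.2.map (fun t => (t, p.1)))) := by
  decide

-- First match in the flattened association list = first bucket whose title list contains c.
lemma getD_mk_map_append (c b : String) (ts : List String) (rest : List (String × String)) :
    (PySem.Dict.mk (ts.map (fun t => (t, b)) ++ rest)).getD c "Other"
      = if ts.contains c then b else (PySem.Dict.mk rest).getD c "Other" := by
  induction ts with
  | nil => simp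
  | cons t ts ih =>
      simp only [List.map_cons, List.cons_append, List.contains_cons,
        PySem.Dict.getD_eq_get?_getD, PySem.Dict.get?_mk_cons] at *
      by_cases h : c = t
      · simp [h]
      · have h' : (t == c) = false := by simp [Ne.symm h]
        simp [h, h', ih]

lemma bucketLoop_eq (c : String) (cats : List (String × List String)) :
    bucketLoop c cats
      = (PySem.Dict.mk (cats.flatMap (fun p => p.2.map (fun t => (t, p.1))))).getD c "Other" := by
  induction cats with
  | nil => simp [bucketLoop, PySem.Dict.getD_eq_get?_getD, PySem.Dict.get?]
  | cons p rest ih =>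
      obtain ⟨b, ts⟩ := p
      simp only [bucketLoop, List.flatMap_cons, getD_mk_map_append, ih]

-- ===== VERDICT (by name: the statement is the Claim_ definition above) =====
theorem get_course_bucket_spec : Claim_equal_get_course_bucket := by
  intro c _
  unfold Spec_get_course_bucket get_course_bucket get_course_bucket_alt
  rw [titleToBucket_eq_mk, bucketLoop_eq]
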